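-- pv_equiv track=rewrite | github.com/pinchez420/kca-connect-agentic-ai | backend/app/services/rag_service.py | _should_search_web
-- ===== SOURCE A (Python) =====
-- def _should_search_web(query: str) -> bool:
--     """
--     Determine if a query should trigger web search
--
--     Args:
--         query: User query
--
--     Returns:
--         True if web search should be performed
--     """
--     # Keywords that suggest current/real-time information is needed
--     current_keywords = [
--         'news', 'latest', 'recent', 'current', 'today', 'tomorrow',
--         '2024', '2025', '2023', 'deadline', 'announcement',
--         'update', 'status', 'now', 'this week', 'this month'
--     ]
--
--     query_lower = query.lower()
--
--     # Check for current information keywords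
--     for keyword in current_keywords:
--         if keyword in query_lower:
--             return True
--
--     # Check for question marks suggesting information seeking
--     if '?' in query and len(query.split()) > 4:
--         return True
--
--     return False
-- ===== SOURCE B (Python) =====
-- _CURRENT_KEYWORDS = [
--     'news', 'latest', 'recent', 'current', 'today', 'tomorrow',
--     '2024', '2025', '2023', 'deadline', 'announcement',
--     'update', 'status', 'now', 'this week', 'this month'
-- ]
--
--
-- def _should_search_web(query: str) -> bool:
--     """Single left-to-right pass over the lowered query: at each position,
--     test whether some keyword starts there (multi-pattern prefix scan),
--     instead of one full substring search per keyword."""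
--     q = query.lower()
--     n = len(q)
--     for i in range(n + 1):
--         for k in _CURRENT_KEYWORDS:
--             if q.startswith(k, i):
--                 return True
--     return '?' in query and len(query.split()) > 4
-- ===== Notes on version B (the rewrite author's own statement) =====
-- stated objective: alternative
-- what changed: B replaces A's per-keyword full substring search with a single left-to-right scan over the lowered query that tests at each position whether any keyword starts there.
import Mathlib
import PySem

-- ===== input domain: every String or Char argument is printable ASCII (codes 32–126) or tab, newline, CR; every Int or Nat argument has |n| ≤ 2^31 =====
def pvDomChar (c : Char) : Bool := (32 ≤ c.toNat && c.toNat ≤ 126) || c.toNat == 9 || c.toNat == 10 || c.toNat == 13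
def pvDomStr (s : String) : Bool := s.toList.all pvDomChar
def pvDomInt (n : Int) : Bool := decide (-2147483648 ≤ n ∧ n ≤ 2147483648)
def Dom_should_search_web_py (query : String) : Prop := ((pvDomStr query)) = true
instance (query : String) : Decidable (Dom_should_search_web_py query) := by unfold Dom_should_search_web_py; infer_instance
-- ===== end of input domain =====

-- B scans the lowered query once, testing at each position whether any keyword starts there,
-- instead of A's one full substring search per keyword (alternative decomposition, same cost class).


-- the keyword list, shared verbatim by both Pythons
def pvKeywords : List String :=
  ["news", "latest", "recent", "current", "today", "tomorrow",
   "2024", "2025", "2023", "deadline", "announcement",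
   "update", "status", "now", "this week", "this month"]

-- ===== PORT A =====
-- A: 'for keyword in current_keywords: if keyword in query_lower: return True'
def should_search_web_py (query : String) : Bool :=
  let query_lower := PySem.Str.lower query
  if pvKeywords.any (fun k => PySem.Str.isIn k query_lower) then true
  else if PySem.Str.isIn "?" query && decide (4 < (PySem.Str.split₀ query).length) then true
  else false

-- ===== PORT B =====
-- B's inner check at one position: any(q.startswith(k, i) ...) on the suffix starting at i
def pvScan (kws : List (List Char)) : List Char → Bool
  | [] => kws.any (fun k => PySem.Chars.startswith [] k)
  | c :: t => kws.any (fun k => PySem.Chars.startswith (c :: t) k) || pvScan kws t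

def should_search_web_py_alt (query : String) : Bool :=
  let q := PySem.Str.lower query
  if pvScan (pvKeywords.map String.toList) q.toList then true
  else PySem.Str.isIn "?" query && decide (4 < (PySem.Str.split₀ query).length)

-- ===== PRECONDITION & SPEC =====
def Spec_should_search_web_py (query : String) (out : Bool) : Prop := out = should_search_web_py_alt query
instance (query : String) (out : Bool) : Decidable (Spec_should_search_web_py query out) := by unfold Spec_should_search_web_py; infer_instance

-- ===== CLAIM (what is proved, stated in full; the proofs are below) =====
def Claim_equal_should_search_web_py : Prop := ∀ (query : String), Dom_should_search_web_py query → Spec_should_search_web_py query (should_search_web_py query)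

-- ===== LEMMAS AND PROOFS =====

theorem pvScan_eq_true_iff (kws : List (List Char)) (cs : List Char) :
    pvScan kws cs = true ↔ ∃ k ∈ kws, ∃ j, k <+: cs.drop j := by
  induction cs with
  | nil =>
    simp [pvScan, PySem.Chars.startswith_iff]
  | cons c t ih =>
    simp only [pvScan, Bool.or_eq_true, List.any_eq_true, PySem.Chars.startswith_iff, ih]
    constructor
    · rintro (⟨k, hk, hp⟩ | ⟨k, hk, j, hp⟩)
      · exact ⟨k, hk, 0, hp⟩
      · exact ⟨k, hk, j + 1, by simpa using hp⟩
    · rintro ⟨k, hk, j, hp⟩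
      cases j with
      | zero => exact Or.inl ⟨k, hk, hp⟩
      | succ j => exact Or.inr ⟨k, hk, j, by simpa using hp⟩

theorem pvScan_eq_any_isIn (kws : List (List Char)) (cs : List Char) :
    pvScan kws cs = kws.any (fun k => PySem.Chars.isIn k cs) := by
  rcases h : kws.any (fun k => PySem.Chars.isIn k cs) with _ | _
  · rw [Bool.eq_false_iff]
    intro hc
    rcases (pvScan_eq_true_iff kws cs).1 hc with ⟨k, hk, j, hp⟩
    have : PySem.Chars.isIn k cs = true :=
      (PySem.Chars.exists_prefix_drop_iff_isIn k cs).1 ⟨j, hp⟩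
    simp only [List.any_eq_false] at h
    exact absurd this (by simpa using h k hk)
  · simp only [List.any_eq_true] at h
    rcases h with ⟨k, hk, hin⟩
    rcases (PySem.Chars.exists_prefix_drop_iff_isIn k cs).2 hin with ⟨j, hp⟩
    exact (pvScan_eq_true_iff kws cs).2 ⟨k, hk, j, hp⟩

-- ===== VERDICT (by name: the statement is the Claim_ definition above) =====
theorem should_search_web_py_spec : Claim_equal_should_search_web_py := by
  intro query _
  unfold Spec_should_search_web_py should_search_web_py should_search_web_py_alt
  simp only []
  rw [pvScan_eq_any_isIn]
  have : (pvKeywords.map String.toList).any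
      (fun k => PySem.Chars.isIn k (PySem.Str.lower query).toList)
      = pvKeywords.any (fun k => PySem.Str.isIn k (PySem.Str.lower query)) := by
    simp [List.any_map, PySem.Str.isIn, Function.comp_def]
  rw [this]
  rcases pvKeywords.any (fun k => PySem.Str.isIn k (PySem.Str.lower query)) with _ | _ <;> simp
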